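-- pv_equiv track=rewrite | github.com/JAZthebeast/Hopper | hopper.py | animation
-- ===== SOURCE A (Python) =====
-- def animation(frame, animation_type, image, per_frames):
-- 	for i in range(int(60 / per_frames)):
-- 		if frame == per_frames * i:
-- 			if image == animation_type[0]:
-- 				image = animation_type[1]
-- 				frame = frame
-- 			elif image == animation_type[1]:
-- 				image = animation_type[0]
-- 				frame = frame
-- 			else:
-- 				image = animation_type[0]
-- 				frame = 0
-- 	return image, frame
-- ===== SOURCE B (Python) =====
-- def animation(frame, animation_type, image, per_frames):
--     n = int(60 / per_frames)  # same ZeroDivisionError as A when per_frames == 0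
--     if per_frames > 0 and frame >= 0 and frame % per_frames == 0 and frame // per_frames < n:
--         if image == animation_type[0]:
--             return animation_type[1], frame
--         if image == animation_type[1]:
--             return animation_type[0], frame
--         return animation_type[0], 0
--     return image, frame
-- ===== Notes on version B (the rewrite author's own statement) =====
-- stated objective: simpler
-- what changed: Replaces A's scan over range(int(60/per_frames)) with a single divisibility test (the swap fires iff per_frames > 0, frame is a non-negative multiple of per_frames and frame // per_frames < int(60/per_frames)), then applies the same three-way image/frame update once.
import Mathlib
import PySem

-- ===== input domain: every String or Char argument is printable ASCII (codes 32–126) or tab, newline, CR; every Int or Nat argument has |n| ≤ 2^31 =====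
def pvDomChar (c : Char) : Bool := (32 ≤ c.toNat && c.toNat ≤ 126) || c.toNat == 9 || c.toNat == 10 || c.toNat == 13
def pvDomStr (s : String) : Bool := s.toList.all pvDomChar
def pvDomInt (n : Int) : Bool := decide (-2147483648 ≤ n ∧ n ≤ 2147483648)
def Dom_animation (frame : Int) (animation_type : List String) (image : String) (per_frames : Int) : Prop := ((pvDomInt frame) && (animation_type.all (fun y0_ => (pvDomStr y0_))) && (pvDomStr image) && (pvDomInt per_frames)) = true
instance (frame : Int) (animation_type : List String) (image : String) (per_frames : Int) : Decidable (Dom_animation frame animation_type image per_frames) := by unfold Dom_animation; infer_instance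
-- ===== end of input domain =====

-- B replaces A's scan over range(int(60/per_frames)) with a single divisibility test; same return value.

-- ===== PORT A =====
-- one loop iteration of A: state is (image, frame)
def animStep (per_frames : Int) (animation_type : List String) (s : String × Int) (i : Int) : String × Int :=
  if s.2 = per_frames * i then
    if s.1 = PySem.List.pyGetD animation_type 0 "" then
      (PySem.List.pyGetD animation_type 1 "", s.2)
    else if s.1 = PySem.List.pyGetD animation_type 1 "" then
      (PySem.List.pyGetD animation_type 0 "", s.2)
    else
      (PySem.List.pyGetD animation_type 0 "", 0)
  else s

def animation (frame : Int) (animation_type : List String) (image : String) (per_frames : Int) : String × Int :=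
  -- int(60 / per_frames): exact as truncating division on this domain (|per_frames| ≤ 2^31 < 2^53)
  (PySem.List.pyRange 0 (PySem.Int.truncdiv 60 per_frames) 1).foldl
    (animStep per_frames animation_type) (image, frame)

-- ===== PORT B =====
def animation_alt (frame : Int) (animation_type : List String) (image : String) (per_frames : Int) : String × Int :=
  let n := PySem.Int.truncdiv 60 per_frames
  if 0 < per_frames ∧ 0 ≤ frame ∧ PySem.Int.mod frame per_frames = 0 ∧
      PySem.Int.floordiv frame per_frames < n then
    if image = PySem.List.pyGetD animation_type 0 "" then
      (PySem.List.pyGetD animation_type 1 "", frame)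
    else if image = PySem.List.pyGetD animation_type 1 "" then
      (PySem.List.pyGetD animation_type 0 "", frame)
    else
      (PySem.List.pyGetD animation_type 0 "", 0)
  else (image, frame)

-- ===== PRECONDITION & SPEC =====
-- Pre_ excludes exactly the inputs where the Python raises: per_frames == 0 (ZeroDivisionError in
-- int(60/per_frames)) and the inputs where the swap fires with fewer than two frames in
-- animation_type (IndexError on animation_type[0] or animation_type[1]).
def Pre_animation (frame : Int) (animation_type : List String) (image : String) (per_frames : Int) : Prop :=
  per_frames ≠ 0 ∧
  ((0 < per_frames ∧ 0 ≤ frame ∧ per_frames ∣ frame ∧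
      frame < per_frames * PySem.Int.floordiv 60 per_frames) → 2 ≤ animation_type.length)
instance (frame : Int) (animation_type : List String) (image : String) (per_frames : Int) : Decidable (Pre_animation frame animation_type image per_frames) := by unfold Pre_animation; infer_instance
def pvWitness_animation : Int × List String × String × Int := (10, ["a", "b"], "a", 5)

def Spec_animation (frame : Int) (animation_type : List String) (image : String) (per_frames : Int) (out : String × Int) : Prop := out = animation_alt frame animation_type image per_frames
instance (frame : Int) (animation_type : List String) (image : String) (per_frames : Int) (out : String × Int) : Decidable (Spec_animation frame animation_type image per_frames out) := by unfold Spec_animation; infer_instance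

-- ===== CLAIM (what is proved, stated in full; the proofs are below) =====
def Claim_equal_animation : Prop := ∀ (frame : Int) (animation_type : List String) (image : String) (per_frames : Int), Dom_animation frame animation_type image per_frames → Pre_animation frame animation_type image per_frames → Spec_animation frame animation_type image per_frames (animation frame animation_type image per_frames)

-- ===== LEMMAS AND PROOFS =====

-- folding A's step over indices none of which fires leaves the state unchanged
theorem foldl_animStep_no_fire (pf : Int) (at_ : List String) (l : List Int) (s : String × Int)
    (h : ∀ i ∈ l, s.2 ≠ pf * i) :
    l.foldl (animStep pf at_) s = s := by
  induction l with
  | nil => rfl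
  | cons x xs ih =>
    have hx : s.2 ≠ pf * x := h x (by simp)
    simp only [List.foldl_cons, animStep, if_neg hx]
    exact ih (fun i hi => h i (by simp [hi]))

theorem animation_spec' (frame : Int) (animation_type : List String) (image : String)
    (per_frames : Int) (hpre : Pre_animation frame animation_type image per_frames) :
    animation frame animation_type image per_frames
      = animation_alt frame animation_type image per_frames := by
  obtain ⟨hpf0, hlen⟩ := hpre
  simp only [animation, animation_alt]
  rcases lt_trichotomy per_frames 0 with hneg | hz | hpos
  · -- per_frames < 0: int(60/per_frames) ≤ 0, empty range; B's guard is false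
    have hn : PySem.Int.truncdiv 60 per_frames ≤ 0 := by
      have := Int.tdiv_nonpos_of_nonneg_of_nonpos (a := (60 : Int)) (b := per_frames)
        (by norm_num) (le_of_lt hneg)
      simpa [PySem.Int.truncdiv] using this
    rw [PySem.List.pyRange_one_eq_nil (by omega)]
    simp only [List.foldl_nil]
    rw [if_neg (fun h => absurd h.1 (by omega))]
  · exact absurd hz hpf0
  · -- per_frames > 0: n = 60 / per_frames (floor division)
    have hn_eq : PySem.Int.truncdiv 60 per_frames = PySem.Int.floordiv 60 per_frames := by
      rw [PySem.Int.floordiv_eq_ediv_of_pos hpos, PySem.Int.truncdiv,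
        Int.tdiv_eq_ediv_of_nonneg (by norm_num)]
    set n := PySem.Int.truncdiv 60 per_frames with hn_def
    by_cases hfire : 0 ≤ frame ∧ per_frames ∣ frame ∧ frame < per_frames * n
    · -- the swap fires at exactly k = frame / per_frames
      obtain ⟨hf0, ⟨k, hk⟩, hlt⟩ := hfire
      have hk0 : 0 ≤ k := by nlinarith
      have hkn : k < n := by nlinarith
      have hcond : 0 < per_frames ∧ 0 ≤ frame ∧ PySem.Int.mod frame per_frames = 0 ∧
          PySem.Int.floordiv frame per_frames < n := by
        refine ⟨hpos, hf0, ?_, ?_⟩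
        · rw [PySem.Int.mod_eq_zero_iff_dvd]; exact ⟨k, hk⟩
        · rw [PySem.Int.floordiv_eq_ediv_of_pos hpos, hk, Int.mul_ediv_cancel_left _ hpf0]
          exact hkn
      have htail : ∀ (v : Int), v = frame ∨ v = 0 →
          ∀ i ∈ PySem.List.pyRange (k + 1) n 1, v ≠ per_frames * i := by
        intro v hv i hi hE
        rw [PySem.List.mem_pyRange_one] at hi
        rcases hv with rfl | rfl
        · rw [hk] at hE
          have : k = i := mul_left_cancel₀ hpf0 hE
          omega
        · have : 0 < per_frames * i := mul_pos hpos (by omega)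
          omega
      rw [if_pos hcond,
        PySem.List.pyRange_one_append 0 k n hk0 (le_of_lt hkn), List.foldl_append,
        foldl_animStep_no_fire per_frames animation_type _ (image, frame)
          (by
            intro i hi hE
            rw [PySem.List.mem_pyRange_one] at hi
            simp only at hE
            rw [hk] at hE
            have : k = i := mul_left_cancel₀ hpf0 hE
            omega),
        PySem.List.pyRange_one_cons hkn]
      simp only [List.foldl_cons, animStep, if_pos (show ((image, frame) : String × Int).2 = per_frames * k from hk)]
      split_ifs with h1 h2
      · exact foldl_animStep_no_fire _ _ _ _ (htail frame (Or.inl rfl))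
      · exact foldl_animStep_no_fire _ _ _ _ (htail frame (Or.inl rfl))
      · exact foldl_animStep_no_fire _ _ _ _ (htail 0 (Or.inr rfl))
    · -- no index fires; both sides return (image, frame)
      have hnof : ∀ i ∈ PySem.List.pyRange 0 n 1,
          ((image, frame) : String × Int).2 ≠ per_frames * i := by
        intro i hi
        rw [PySem.List.mem_pyRange_one] at hi
        intro hEq
        exact hfire ⟨by nlinarith [hi.1], ⟨i, hEq⟩, by nlinarith [hi.2]⟩
      rw [foldl_animStep_no_fire _ _ _ _ hnof]
      rw [if_neg]
      intro ⟨_, h1, h2, h3⟩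
      rw [PySem.Int.mod_eq_zero_iff_dvd] at h2
      rw [PySem.Int.floordiv_eq_ediv_of_pos hpos] at h3
      obtain ⟨k, hk⟩ := h2
      refine hfire ⟨h1, ⟨k, hk⟩, ?_⟩
      have : frame / per_frames = k := by rw [hk]; exact Int.mul_ediv_cancel_left _ hpf0
      rw [this] at h3
      nlinarith

-- ===== VERDICT (by name: the statement is the Claim_ definition above) =====
theorem animation_spec : Claim_equal_animation := by
  intro frame animation_type image per_frames _ hpre
  exact animation_spec' frame animation_type image per_frames hpre
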